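-- pv_equiv track=rewrite | github.com/Code2Bench/Code2Bench | code2bench/func_selector/func_selector.py | _is_non_basic_type
-- ===== SOURCE A (Python) =====
-- def _is_non_basic_type(type_hint_str: str, basic_types: set) -> bool:
--     """
--     递归检查类型提示字符串是否包含非基本类型。
--
--     Args:
--         type_hint_str: 类型提示字符串，例如 "Tuple[int, DataFrame]"
--         basic_types: 基本类型集合
--
--     Returns:
--         bool: 如果类型提示字符串中包含非基本类型，则返回 True，否则返回 False。
--     """
--     type_hint_str = type_hint_str.strip()
--     if not type_hint_str:
--         return False
--
--     if '[' in type_hint_str and ']' in type_hint_str: # 泛型类型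
--         base_type = type_hint_str.split('[')[0].strip()
--         if base_type not in basic_types and base_type not in ["List", "Tuple", "Optional", "Dict", "Iterable"]: #  添加 "Iterable"
--             return True
--
--         inner_type_str = type_hint_str[len(base_type)+1:-1]
--         inner_types = []
--         bracket_level = 0
--         current_type = ''
--         for char in inner_type_str:
--             if char == '[':
--                 bracket_level += 1
--                 current_type += char
--             elif char == ']':
--                 bracket_level -= 1
--                 current_type += char
--             elif char == ',' and bracket_level == 0: # 只在顶层逗号分割
--                 inner_types.append(current_type.strip())
--                 current_type = ''
--             else:
--                 current_type += char
--         inner_types.append(current_type.strip())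
--
--         for inner_type in inner_types:
--             if _is_non_basic_type(inner_type, basic_types):
--                 return True
--         return False
--
--     else: # 基本类型或类型参数
--         base_type = type_hint_str.split('.')[0].strip()
--         # 修改：如果类型名以 _ 开头，也认为是 Non-basic type (TypeVar)
--         if base_type.startswith('_'):
--             return True
--         return base_type not in basic_types
-- ===== SOURCE B (Python) =====
-- def _is_non_basic_type(type_hint_str: str, basic_types: set) -> bool:
--     # Iterative worklist instead of recursion; top-level commas found by an
--     # index/depth scan that emits slices of the inner string (no character
--     # accumulator); whitelist checked against one precomputed union set.
--     generic_ok = set(basic_types) | {"List", "Tuple", "Optional", "Dict", "Iterable"}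
--     pending = [type_hint_str]
--     while pending:
--         seg = pending.pop().strip()
--         if not seg:
--             continue
--         if '[' in seg and ']' in seg:
--             base = seg.split('[')[0].strip()
--             if base not in generic_ok:
--                 return True
--             inner = seg[len(base)+1:-1]
--             start, depth = 0, 0
--             for i, ch in enumerate(inner):
--                 if ch == '[':
--                     depth += 1
--                 elif ch == ']':
--                     depth -= 1
--                 elif ch == ',' and depth == 0:
--                     pending.append(inner[start:i])
--                     start = i + 1
--             pending.append(inner[start:])
--         else:
--             name = seg.split('.')[0].strip()
--             if name.startswith('_') or name not in basic_types:
--                 return True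
--     return False
-- ===== Notes on version B (the rewrite author's own statement) =====
-- stated objective: alternative
-- what changed: Replaced A's recursion by an iterative worklist loop, replaced the character-accumulator comma splitter by an index/depth scan that emits slices of the inner string, and replaced the two separate whitelist membership tests by one precomputed union set.
import Mathlib
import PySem

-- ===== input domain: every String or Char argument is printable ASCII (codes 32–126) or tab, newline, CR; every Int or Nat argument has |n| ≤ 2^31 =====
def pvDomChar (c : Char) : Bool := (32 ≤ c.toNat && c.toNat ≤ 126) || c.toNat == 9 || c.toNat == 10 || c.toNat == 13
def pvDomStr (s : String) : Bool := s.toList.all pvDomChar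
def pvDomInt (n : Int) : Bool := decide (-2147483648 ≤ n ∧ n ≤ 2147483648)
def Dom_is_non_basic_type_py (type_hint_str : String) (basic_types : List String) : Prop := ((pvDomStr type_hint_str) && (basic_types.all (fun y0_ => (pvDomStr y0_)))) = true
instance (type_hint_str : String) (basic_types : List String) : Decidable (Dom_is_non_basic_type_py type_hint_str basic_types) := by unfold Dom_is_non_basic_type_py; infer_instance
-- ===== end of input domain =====

-- B replaces A's recursion by an iterative worklist loop, the accumulator-based
-- comma splitter by an index/depth scan emitting slices, and the two whitelist
-- tests by one precomputed union; objective: alternative decomposition, same cost.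

-- ===== PORT A =====

-- the whitelist literal ["List", "Tuple", "Optional", "Dict", "Iterable"]
def pvSpecial : List (List Char) :=
  ["List".toList, "Tuple".toList, "Optional".toList, "Dict".toList, "Iterable".toList]

-- A's top-level-comma splitting scan with a character accumulator:
-- for char in inner_type_str: … ; inner_types.append(current_type.strip())
def pvSplitTop : List Char → Int → List Char → List (List Char)
  | [], _, cur => [PySem.Chars.strip cur]
  | c :: rest, lvl, cur =>
    if c = '[' then pvSplitTop rest (lvl + 1) (cur ++ [c])
    else if c = ']' then pvSplitTop rest (lvl - 1) (cur ++ [c])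
    else if c = ',' ∧ lvl = 0 then PySem.Chars.strip cur :: pvSplitTop rest lvl []
    else pvSplitTop rest lvl (cur ++ [c])

-- A's recursion, with fuel as a totality guard only (fuel = length + 1 always suffices;
-- every recursive argument is strictly shorter, see pvGoA_stable below)
def pvGoA (fuel : Nat) (s : List Char) (bt : List (List Char)) : Bool :=
  match fuel with
  | 0 => false
  | fuel + 1 =>
    let t := PySem.Chars.strip s
    if t = [] then false
    else if '[' ∈ t ∧ ']' ∈ t then
      let base := PySem.Chars.strip ((PySem.Chars.splitOn t ['[']).headD [])
      if base ∉ bt ∧ base ∉ pvSpecial then true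
      else
        let inner := PySem.List.slice t (some ((base.length : Int) + 1)) (some (-1))
        (pvSplitTop inner 0 []).any (fun p => pvGoA fuel p bt)
    else
      let base := PySem.Chars.strip ((PySem.Chars.splitOn t ['.']).headD [])
      if PySem.Chars.startswith base ['_'] then true
      else base ∉ bt

def is_non_basic_type_py (type_hint_str : String) (basic_types : List String) : Bool :=
  pvGoA (type_hint_str.toList.length + 1) type_hint_str.toList (basic_types.map String.toList)

-- ===== PORT B =====

-- generic_ok = set(basic_types) | {"List", "Tuple", "Optional", "Dict", "Iterable"}
-- (membership in the union; list concatenation has the same membership)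
def pvGenericOk (bt : List (List Char)) : List (List Char) :=
  bt ++ ["List".toList, "Tuple".toList, "Optional".toList, "Dict".toList, "Iterable".toList]

-- for i, ch in enumerate(inner): … pending.append(inner[start:i]); start = i+1 …
-- returns the grown pending list together with the final value of start
def pvScanB (inner : List Char) : List (Int × Char) → Int → Int → List (List Char) →
    List (List Char) × Int
  | [], start, _, pending => (pending, start)
  | (i, ch) :: more, start, depth, pending =>
    if ch = '[' then pvScanB inner more start (depth + 1) pending
    else if ch = ']' then pvScanB inner more start (depth - 1) pending
    else if ch = ',' ∧ depth = 0 then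
      pvScanB inner more (i + 1) depth (pending ++ [PySem.List.slice inner (some start) (some i)])
    else pvScanB inner more start depth pending

-- the worklist loop: pop the last segment, classify it, append the slices of a
-- generic's inner string back onto pending; fuel is a totality guard only
def pvGoB (fuel : Nat) (pending : List (List Char)) (bt btU : List (List Char)) : Bool :=
  match fuel with
  | 0 => false
  | fuel + 1 =>
    match pending.getLast? with
    | none => false
    | some popped =>
      let seg := PySem.Chars.strip popped
      if seg = [] then pvGoB fuel pending.dropLast bt btU
      else if '[' ∈ seg ∧ ']' ∈ seg then
        let base := PySem.Chars.strip ((PySem.Chars.splitOn seg ['[']).headD [])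
        if base ∉ btU then true
        else
          let inner := PySem.List.slice seg (some ((base.length : Int) + 1)) (some (-1))
          let st := pvScanB inner (PySem.List.enumerate inner 0) 0 0 pending.dropLast
          pvGoB fuel (st.1 ++ [PySem.List.slice inner (some st.2) none]) bt btU
      else
        let name := PySem.Chars.strip ((PySem.Chars.splitOn seg ['.']).headD [])
        if PySem.Chars.startswith name ['_'] || decide (name ∉ bt) then true
        else pvGoB fuel pending.dropLast bt btU

def is_non_basic_type_py_alt (type_hint_str : String) (basic_types : List String) : Bool :=
  pvGoB (type_hint_str.toList.length + 1) [type_hint_str.toList]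
    (basic_types.map String.toList) (pvGenericOk (basic_types.map String.toList))

-- ===== PRECONDITION & SPEC =====
def Spec_is_non_basic_type_py (type_hint_str : String) (basic_types : List String) (out : Bool) : Prop := out = is_non_basic_type_py_alt type_hint_str basic_types
instance (type_hint_str : String) (basic_types : List String) (out : Bool) : Decidable (Spec_is_non_basic_type_py type_hint_str basic_types out) := by unfold Spec_is_non_basic_type_py; infer_instance

-- ===== CLAIM (what is proved, stated in full; the proofs are below) =====
def Claim_equal_is_non_basic_type_py : Prop := ∀ (type_hint_str : String) (basic_types : List String), Dom_is_non_basic_type_py type_hint_str basic_types → Spec_is_non_basic_type_py type_hint_str basic_types (is_non_basic_type_py type_hint_str basic_types)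

-- ===== LEMMAS AND PROOFS =====

lemma pvStrip_length_le (cs : List Char) : (PySem.Chars.strip cs).length ≤ cs.length := by
  simp [PySem.Chars.strip, PySem.Chars.lstrip, PySem.Chars.rstrip]
  exact le_trans (List.length_dropWhile_le _ _) (by simpa using List.length_dropWhile_le _ _)

lemma pvDropWhile_idem {α : Type} (p : α → Bool) (l : List α) :
    List.dropWhile p (List.dropWhile p l) = List.dropWhile p l := by
  induction l with
  | nil => rfl
  | cons a t ih =>
    by_cases h : p a = true
    · simp [h, ih]
    · simp [h]

lemma pvStrip_idem (l : List Char) :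
    PySem.Chars.strip (PySem.Chars.strip l) = PySem.Chars.strip l := by
  simp only [PySem.Chars.strip, PySem.Chars.lstrip, PySem.Chars.rstrip]
  set p := PySem.Chars.isspace
  set u := List.dropWhile p l with hu
  set z := List.dropWhile p u.reverse with hz
  -- z.reverse is a prefix of u, whose head fails p, so lstrip leaves z.reverse alone
  have hsuf : z <:+ u.reverse := List.dropWhile_suffix p
  obtain ⟨t, ht⟩ := hsuf
  have hpre : u = z.reverse ++ t.reverse := by
    have := congrArg List.reverse ht
    simpa [List.reverse_append] using this.symm
  have hdw : List.dropWhile p z.reverse = z.reverse := by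
    cases hzr : z.reverse with
    | nil => simp
    | cons b bs =>
      have hb : p b = false := by
        have hu' : u = b :: (bs ++ t.reverse) := by simp [hpre, hzr]
        have h := List.head?_dropWhile_not p l
        rw [← hu] at h
        simp [hu'] at h
        exact h
      simp [hb]
  rw [hdw, List.reverse_reverse, hz, pvDropWhile_idem]

lemma pvAnyCongr {l : List (List Char)} {f g : List Char → Bool}
    (h : ∀ x ∈ l, f x = g x) : l.any f = l.any g := by
  induction l with
  | nil => rfl
  | cons a t ih =>
    simp only [List.any_cons]
    rw [h a (by simp), ih (fun x hx => h x (List.mem_cons_of_mem _ hx))]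

-- every piece, counted with a +1 for its stack slot, fits in inner + cur + 1
lemma pvSplitTop_sum (cs : List Char) : ∀ lvl cur,
    ((pvSplitTop cs lvl cur).map (fun p => p.length + 1)).sum ≤ cs.length + cur.length + 1 := by
  induction cs with
  | nil => intro lvl cur; simpa [pvSplitTop] using pvStrip_length_le cur
  | cons c rest ih =>
    intro lvl cur
    simp only [pvSplitTop]
    split_ifs with h1 h2 h3
    · have := ih (lvl + 1) (cur ++ [c]); simp at this ⊢; omega
    · have := ih (lvl - 1) (cur ++ [c]); simp at this ⊢; omega
    · have := ih lvl []
      have hs := pvStrip_length_le cur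
      simp at this ⊢; omega
    · have := ih lvl (cur ++ [c]); simp at this ⊢; omega

lemma pvSplitTop_mem_length {p : List Char} {cs : List Char} {lvl : Int} {cur : List Char}
    (hp : p ∈ pvSplitTop cs lvl cur) : p.length ≤ cs.length + cur.length := by
  have hsum := pvSplitTop_sum cs lvl cur
  have : p.length + 1 ≤ ((pvSplitTop cs lvl cur).map (fun q => q.length + 1)).sum :=
    List.single_le_sum (by intro x hx; omega) _ (List.mem_map_of_mem hp)
  omega

-- the slice t[len(base)+1:-1] is strictly shorter than t (t nonempty)
lemma pvInner_length_lt {t : List Char} (ht : t ≠ []) (k : Nat) :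
    (PySem.List.slice t (some ((k : Int) + 1)) (some (-1))).length < t.length := by
  have h := PySem.List.length_slice t ((k : Int) + 1) (-1)
  have h1 : PySem.List.clampIdx t.length (-1) = t.length - 1 := PySem.List.clampIdx_neg_one _
  have h2 : PySem.List.clampIdx t.length ((k : Int) + 1) = min (k + 1) t.length := by
    have : ((k : Int) + 1) = ((k + 1 : Nat) : Int) := by push_cast; ring
    rw [this, PySem.List.clampIdx_natCast]
  have hlen : t.length ≠ 0 := by simpa using List.length_pos_of_ne_nil ht |>.ne'
  omega

-- pvGoA does not depend on the fuel once the fuel exceeds the string length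
lemma pvGoA_stable : ∀ (f1 f2 : Nat) (s : List Char) (bt : List (List Char)),
    s.length < f1 → s.length < f2 → pvGoA f1 s bt = pvGoA f2 s bt := by
  intro f1
  induction f1 with
  | zero => intro f2 s bt h; omega
  | succ f1 ih =>
    intro f2 s bt h1 h2
    match f2, h2 with
    | f2 + 1, h2 =>
      simp only [pvGoA]
      split_ifs with he hb hbad
      · rfl
      · rfl
      · apply pvAnyCongr
        intro p hp
        have hstrip : (PySem.Chars.strip s).length ≤ s.length := pvStrip_length_le s
        have hinner := pvInner_length_lt (t := PySem.Chars.strip s) he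
          (PySem.Chars.strip ((PySem.Chars.splitOn (PySem.Chars.strip s) ['[']).headD [])).length
        have hplen := pvSplitTop_mem_length hp
        simp only [List.length_nil, Nat.add_zero] at hplen
        exact ih f2 p bt (by omega) (by omega)
      · rfl
      · rfl

-- A's result at canonical fuel
def pvA (s : List Char) (bt : List (List Char)) : Bool := pvGoA (s.length + 1) s bt

-- A's result is unchanged by pre-stripping its argument (strip is idempotent)
lemma pvA_strip (s : List Char) (bt : List (List Char)) :
    pvA (PySem.Chars.strip s) bt = pvA s bt := by
  show pvGoA ((PySem.Chars.strip s).length + 1) (PySem.Chars.strip s) bt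
      = pvGoA (s.length + 1) s bt
  simp only [pvGoA, pvStrip_idem]
  split_ifs with he hb hbad
  · rfl
  · rfl
  · apply pvAnyCongr
    intro p hp
    have hstrip : (PySem.Chars.strip s).length ≤ s.length := pvStrip_length_le s
    have hinner := pvInner_length_lt (t := PySem.Chars.strip s) he
      (PySem.Chars.strip ((PySem.Chars.splitOn (PySem.Chars.strip s) ['[']).headD [])).length
    have hplen := pvSplitTop_mem_length hp
    simp only [List.length_nil, Nat.add_zero] at hplen
    exact pvGoA_stable _ _ p bt (by omega) (by omega)
  · rfl
  · rfl

lemma pvA_empty (top : List Char) (bt : List (List Char))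
    (he : PySem.Chars.strip top = []) : pvA top bt = false := by
  simp [pvA, pvGoA, he]

lemma pvA_genericBad (top : List Char) (bt : List (List Char))
    (he : ¬ PySem.Chars.strip top = [])
    (hb : '[' ∈ PySem.Chars.strip top ∧ ']' ∈ PySem.Chars.strip top)
    (hbad : PySem.Chars.strip ((PySem.Chars.splitOn (PySem.Chars.strip top) ['[']).headD []) ∉ bt ∧
        PySem.Chars.strip ((PySem.Chars.splitOn (PySem.Chars.strip top) ['[']).headD []) ∉ pvSpecial) :
    pvA top bt = true := by
  simp only [pvA, pvGoA]
  rw [if_neg he, if_pos hb, if_pos hbad]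

lemma pvA_generic (top : List Char) (bt : List (List Char))
    (he : ¬ PySem.Chars.strip top = [])
    (hb : '[' ∈ PySem.Chars.strip top ∧ ']' ∈ PySem.Chars.strip top)
    (hbad : ¬ (PySem.Chars.strip ((PySem.Chars.splitOn (PySem.Chars.strip top) ['[']).headD []) ∉ bt ∧
        PySem.Chars.strip ((PySem.Chars.splitOn (PySem.Chars.strip top) ['[']).headD []) ∉ pvSpecial)) :
    pvA top bt = (pvSplitTop (PySem.List.slice (PySem.Chars.strip top)
        (some ((PySem.Chars.strip ((PySem.Chars.splitOn (PySem.Chars.strip top) ['[']).headD [])).length + 1))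
        (some (-1))) 0 []).any (fun p => pvA p bt) := by
  simp only [pvA, pvGoA]
  rw [if_neg he, if_pos hb, if_neg hbad]
  apply pvAnyCongr
  intro p hp
  have hstrip : (PySem.Chars.strip top).length ≤ top.length := pvStrip_length_le top
  have hinner := pvInner_length_lt (t := PySem.Chars.strip top) he
    (PySem.Chars.strip ((PySem.Chars.splitOn (PySem.Chars.strip top) ['[']).headD [])).length
  have hplen := pvSplitTop_mem_length hp
  simp only [List.length_nil, Nat.add_zero] at hplen
  show pvGoA top.length p bt = pvA p bt
  unfold pvA
  exact pvGoA_stable top.length (p.length + 1) p bt (by omega) (by omega)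

lemma pvA_leaf (top : List Char) (bt : List (List Char))
    (he : ¬ PySem.Chars.strip top = [])
    (hb : ¬ ('[' ∈ PySem.Chars.strip top ∧ ']' ∈ PySem.Chars.strip top)) :
    pvA top bt = (PySem.Chars.startswith (PySem.Chars.strip ((PySem.Chars.splitOn (PySem.Chars.strip top) ['.']).headD [])) ['_'] ||
        decide (PySem.Chars.strip ((PySem.Chars.splitOn (PySem.Chars.strip top) ['.']).headD []) ∉ bt)) := by
  simp only [pvA, pvGoA]
  rw [if_neg he, if_neg hb]
  split_ifs with h
  · rw [h, Bool.true_or]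
  · simp only [Bool.not_eq_true] at h
    rw [h, Bool.false_or]


-- mapping strip over B's slices reproduces A's splitter output (B emits raw
-- slices inner[start:i]; stripping them equals A's stripped accumulator pieces)
lemma pvScanB_spec (inner : List Char) : ∀ (rest : List Char) (i start : Nat) (depth : Int)
    (pending : List (List Char)), rest = inner.drop i → start ≤ i →
    ((pvScanB inner (PySem.List.enumerate rest (i : Int)) (start : Int) depth pending).1.map
        PySem.Chars.strip)
      ++ [PySem.Chars.strip (PySem.List.slice inner
          (some ((pvScanB inner (PySem.List.enumerate rest (i : Int)) (start : Int) depth pending).2))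
          none)]
    = pending.map PySem.Chars.strip ++ pvSplitTop rest depth ((inner.drop start).take (i - start)) := by
  intro rest
  induction rest with
  | nil =>
    intro i start depth pending hrest hsi
    have hlen : inner.length ≤ i := by
      have := congrArg List.length hrest
      simp [List.length_drop] at this
      omega
    have htake : (inner.drop start).take (i - start) = inner.drop start :=
      List.take_of_length_le (by simp [List.length_drop]; omega)
    simp [PySem.List.enumerate, pvScanB, pvSplitTop, PySem.List.slice_from_natCast, htake]
  | cons c rest' ih =>
    intro i start depth pending hrest hsi
    have hi : i < inner.length := by
      by_contra h
      rw [List.drop_eq_nil_of_le (by omega)] at hrest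
      exact List.cons_ne_nil _ _ hrest
    have hc : inner[i]? = some c := by
      have h0 : (inner.drop i)[0]? = some c := by rw [← hrest]; rfl
      simpa using h0
    have hrest' : rest' = inner.drop (i + 1) := by
      rw [← List.tail_drop, ← hrest]
      rfl
    have hcast : (i : Int) + 1 = ((i + 1 : Nat) : Int) := by push_cast; ring
    have hcur : ∀ h : c ≠ ',' ∨ depth ≠ 0,
        (inner.drop start).take (i - start) ++ [c] = (inner.drop start).take (i + 1 - start) := by
      intro _
      have hg : (inner.drop start)[i - start]? = some c := by
        rw [List.getElem?_drop]
        rwa [show start + (i - start) = i by omega]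
      rw [show i + 1 - start = (i - start) + 1 by omega, List.take_succ, hg]
      rfl
    rw [PySem.List.enumerate_cons]
    simp only [pvSplitTop, pvScanB]
    split_ifs with h1 h2 h3
    · rw [hcast, ih (i + 1) start (depth + 1) pending hrest' (by omega),
        hcur (Or.inl (by simp [h1]))]
    · rw [hcast, ih (i + 1) start (depth - 1) pending hrest' (by omega),
        hcur (Or.inl (by simp [h2]))]
    · rw [hcast, ih (i + 1) (i + 1) depth _ hrest' (by omega)]
      have hslice : PySem.List.slice inner (some (start : Int)) (some (i : Int))
          = (inner.drop start).take (i - start) := PySem.List.slice_natCast inner start i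
      simp [hslice, List.append_assoc]
    · rw [hcast, ih (i + 1) start depth pending hrest' (by omega), hcur (by tauto)]

-- each slice B appends costs exactly the budget it consumes
lemma pvScanB_sum (inner : List Char) : ∀ (rest : List Char) (i start : Nat) (depth : Int)
    (pending : List (List Char)), rest = inner.drop i → start ≤ i →
    (((pvScanB inner (PySem.List.enumerate rest (i : Int)) (start : Int) depth pending).1
        ++ [PySem.List.slice inner
          (some ((pvScanB inner (PySem.List.enumerate rest (i : Int)) (start : Int) depth pending).2))
          none]).map (fun p => p.length + 1)).sum
      ≤ ((pending.map (fun p => p.length + 1)).sum) + (inner.length - start) + 1 := by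
  intro rest
  induction rest with
  | nil =>
    intro i start depth pending hrest hsi
    simp [PySem.List.enumerate, pvScanB, PySem.List.slice_from_natCast, List.length_drop]
    omega
  | cons c rest' ih =>
    intro i start depth pending hrest hsi
    have hi : i < inner.length := by
      by_contra h
      rw [List.drop_eq_nil_of_le (by omega)] at hrest
      exact List.cons_ne_nil _ _ hrest
    have hrest' : rest' = inner.drop (i + 1) := by
      rw [← List.tail_drop, ← hrest]
      rfl
    have hcast : (i : Int) + 1 = ((i + 1 : Nat) : Int) := by push_cast; ring
    rw [PySem.List.enumerate_cons]
    simp only [pvScanB]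
    split_ifs with h1 h2 h3
    · have := ih (i + 1) start (depth + 1) pending hrest' (by omega)
      rw [hcast]; omega
    · have := ih (i + 1) start (depth - 1) pending hrest' (by omega)
      rw [hcast]; omega
    · have := ih (i + 1) (i + 1) depth
        (pending ++ [PySem.List.slice inner (some (start : Int)) (some (i : Int))]) hrest' (by omega)
      rw [hcast]
      have hslice : PySem.List.slice inner (some (start : Int)) (some (i : Int))
          = (inner.drop start).take (i - start) := PySem.List.slice_natCast inner start i
      simp [hslice] at this ⊢
      omega
    · have := ih (i + 1) start depth pending hrest' (by omega)
      rw [hcast]; omega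

-- membership in the precomputed union = the two membership tests of A
lemma pvGenericOk_mem (bt : List (List Char)) (x : List Char) :
    x ∈ pvGenericOk bt ↔ x ∈ bt ∨ x ∈ pvSpecial := by
  simp [pvGenericOk, pvSpecial]

-- the worklist loop returns True iff some pending segment is non-basic (by A's rule)
lemma pvGoB_any : ∀ (fuel : Nat) (pending : List (List Char)) (bt : List (List Char)),
    ((pending.map (fun p => p.length + 1)).sum ≤ fuel) →
    pvGoB fuel pending bt (pvGenericOk bt) = pending.any (fun s => pvA s bt) := by
  intro fuel
  induction fuel with
  | zero =>
    intro pending bt h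
    match pending with
    | [] => simp [pvGoB]
    | x :: xs => simp at h
  | succ fuel ih =>
    intro pending bt h
    match hs : pending.getLast? with
    | none =>
      have : pending = [] := List.getLast?_eq_none_iff.mp hs
      subst this; simp [pvGoB]
    | some top =>
      obtain ⟨pre, hpre⟩ := List.getLast?_eq_some_iff.mp hs
      subst hpre
      have hdl : (pre ++ [top]).dropLast = pre := by simp
      have hsum : ((pre ++ [top]).map (fun p => p.length + 1)).sum
          = (pre.map (fun p => p.length + 1)).sum + (top.length + 1) := by simp
      have hany : ∀ g : List Char → Bool, (pre ++ [top]).any g = (pre.any g || g top) := by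
        intro g; simp
      simp only [pvGoB, hs, hdl]
      split_ifs with he hb hbad hsw
      · -- stripped segment empty: A returns false on it too
        rw [ih pre bt (by omega), hany, pvA_empty top bt he]
        simp
      · -- generic with base in the union: append the slices of the inner string
        rw [ih _ bt ?_, hany, pvA_generic top bt he hb (by
          rw [pvGenericOk_mem] at hbad
          tauto)]
        · -- the appended slices test like A's split pieces (pvA ignores stripping)
          have hspec := pvScanB_spec
            (PySem.List.slice (PySem.Chars.strip top)
              (some ((PySem.Chars.strip ((PySem.Chars.splitOn (PySem.Chars.strip top) ['[']).headD [])).length + 1))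
              (some (-1)))
            (PySem.List.slice (PySem.Chars.strip top)
              (some ((PySem.Chars.strip ((PySem.Chars.splitOn (PySem.Chars.strip top) ['[']).headD [])).length + 1))
              (some (-1))) 0 0 0 pre (by simp) (by omega)
          simp only [Nat.cast_zero, Nat.sub_self, List.take_zero, List.drop_zero] at hspec
          have hmapany : ∀ (l : List (List Char)),
              l.any (fun s => pvA s bt) = (l.map PySem.Chars.strip).any (fun s => pvA s bt) := by
            intro l
            rw [List.any_map]
            exact pvAnyCongr (fun x _ => (pvA_strip x bt).symm)
          rw [hmapany, List.map_append, List.map_cons, List.map_nil, hspec, List.any_append,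
            ← hmapany]
        · -- fuel: the appended slices cost at most the popped segment's budget
          have hsum2 := pvScanB_sum
            (PySem.List.slice (PySem.Chars.strip top)
              (some ((PySem.Chars.strip ((PySem.Chars.splitOn (PySem.Chars.strip top) ['[']).headD [])).length + 1))
              (some (-1)))
            (PySem.List.slice (PySem.Chars.strip top)
              (some ((PySem.Chars.strip ((PySem.Chars.splitOn (PySem.Chars.strip top) ['[']).headD [])).length + 1))
              (some (-1))) 0 0 0 pre (by simp) (by omega)
          have hinner := pvInner_length_lt (t := PySem.Chars.strip top) he
            (PySem.Chars.strip ((PySem.Chars.splitOn (PySem.Chars.strip top) ['[']).headD [])).length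
          have hstrip : (PySem.Chars.strip top).length ≤ top.length := pvStrip_length_le top
          simp only [Nat.cast_zero] at hsum2
          rw [List.map_append, List.sum_append] at hsum2 ⊢
          omega
      · -- generic with base outside the union: A's two ∉ tests both hold
        rw [hany, pvA_genericBad top bt he hb (by
          rw [pvGenericOk_mem] at hbad
          push_neg at hbad
          exact hbad)]
        simp
      · -- leaf that is non-basic: both sides true
        rw [hany, pvA_leaf top bt he hb, hsw]
        simp
      · -- leaf that is basic: A returns false on it too
        rw [ih pre bt (by omega), hany, pvA_leaf top bt he hb]
        simp only [Bool.or_eq_true, decide_eq_true_eq] at hsw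
        push_neg at hsw
        have h1 : PySem.Chars.startswith
            (PySem.Chars.strip ((PySem.Chars.splitOn (PySem.Chars.strip top) ['.']).headD [])) ['_'] = false := by
          simpa using hsw.1
        have h2 : decide
            (PySem.Chars.strip ((PySem.Chars.splitOn (PySem.Chars.strip top) ['.']).headD []) ∉ bt) = false := by
          simp only [decide_eq_false_iff_not, not_not]
          exact hsw.2
        rw [h1, h2]
        simp

-- ===== VERDICT (by name: the statement is the Claim_ definition above) =====
theorem is_non_basic_type_py_spec : Claim_equal_is_non_basic_type_py := by
  intro s bt _
  unfold Spec_is_non_basic_type_py is_non_basic_type_py is_non_basic_type_py_alt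
  rw [pvGoB_any (s.toList.length + 1) [s.toList] _ (by simp)]
  simp [pvA]
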